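-- pv_equiv track=rewrite | github.com/atgiannako/opinion_mining | code/minitagger/model_evaluation.py | estimate_exact_fscore
-- ===== SOURCE A (Python) =====
-- def estimate_exact_fscore(y_true, y_pred):
--     pairs = []
--     start = False
--     end = False
--
--     tp = 0
--     tn = 0
--     fp = 0
--     fn = 0
--
--     for i in range(len(y_true)):
--         if y_true[i] == "O":
--             if y_pred[i] == "O":
--                 tn += 1
--             else:
--                 fp += 1
--         if (y_true[i] == "B"):
--             if start:
--                 end_index = i
--                 start = False
--                 pairs.append((start_index, end_index))
--             if i < len(y_true) - 1:
--                 if y_true[i+1] == "B":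
--                     start_index = i
--                     pairs.append((start_index,))
--                     continue
--             else:
--                 if y_true[i] == "B":
--                     start_index = i
--                     pairs.append((start_index,))
--                     continue
--         if (y_true[i] == "B") and (not start):
--             start = True
--             start_index = i
--         elif start and ((y_true[i] == "O") or (i == len(y_true) - 1)):
--             start = False
--             if i == len(y_true) - 1:
--                 end_index = i + 1
--                 pairs.append((start_index, end_index))
--             else:
--                 end_index = i
--                 pairs.append((start_index, end_index))
--     for pair in pairs:
--         if len(pair) == 1:
--             if y_true[pair[0]] == y_pred[pair[0]]:
--                 tp += 1
--             else:
--                 fn += 1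
--         if len(pair) == 2:
--             if y_true[pair[0]:pair[1]] == y_pred[pair[0]:pair[1]]:
--                 tp += 1
--             else:
--                 fn += 1
--
--     return tp, tn, fp, fn
-- ===== SOURCE B (Python) =====
-- def estimate_exact_fscore(y_true, y_pred):
--     # Single pass: classify each entity span the moment it closes, instead of
--     # collecting span descriptors in a list and re-scanning them in a second loop.
--     n = len(y_true)
--     tp = tn = fp = fn = 0
--     open_start = None  # start index of the currently open span, or None
--     for i, t in enumerate(y_true):
--         if t == "O":
--             if y_pred[i] == "O":
--                 tn += 1
--             else:
--                 fp += 1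
--         if t == "B":
--             if open_start is not None:
--                 if y_true[open_start:i] == y_pred[open_start:i]:
--                     tp += 1
--                 else:
--                     fn += 1
--                 open_start = None
--             if (i + 1 < n and y_true[i + 1] == "B") or i == n - 1:
--                 # isolated "B": judged by this single position
--                 if y_pred[i] == "B":
--                     tp += 1
--                 else:
--                     fn += 1
--             else:
--                 open_start = i
--         elif open_start is not None and (t == "O" or i == n - 1):
--             end = i + 1 if i == n - 1 else i
--             if y_true[open_start:end] == y_pred[open_start:end]:
--                 tp += 1
--             else:
--                 fn += 1
--             open_start = None
--     return tp, tn, fp, fn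
-- ===== Notes on version B (the rewrite author's own statement) =====
-- stated objective: simpler
-- what changed: B replaces A's two-phase design (collect span descriptors in a pairs list, then re-scan that list in a second loop) by a single pass that classifies each entity span the moment it closes, eliminating the intermediate list and the second loop.
import Mathlib
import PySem

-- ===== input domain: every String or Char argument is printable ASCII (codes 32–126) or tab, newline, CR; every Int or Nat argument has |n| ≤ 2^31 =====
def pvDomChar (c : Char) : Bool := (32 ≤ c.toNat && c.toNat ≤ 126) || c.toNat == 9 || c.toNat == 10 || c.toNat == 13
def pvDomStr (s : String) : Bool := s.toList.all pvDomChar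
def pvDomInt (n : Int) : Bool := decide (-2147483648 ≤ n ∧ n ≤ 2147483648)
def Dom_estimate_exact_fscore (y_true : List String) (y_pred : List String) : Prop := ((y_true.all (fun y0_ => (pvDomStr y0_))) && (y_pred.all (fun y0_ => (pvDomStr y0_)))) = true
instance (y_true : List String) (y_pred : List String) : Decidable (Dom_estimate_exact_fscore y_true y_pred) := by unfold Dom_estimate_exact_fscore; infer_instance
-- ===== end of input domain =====

-- B replaces A's two-phase design (collect span descriptors, then re-scan them) by a single
-- pass that classifies each span the moment it closes (objective: simpler; same O(n) cost).

-- ===== PORT A =====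
-- Loop 1 of A over `for i in range(len(y_true))`: accumulates the `pairs` list
-- (a span is (start, some end), a singleton (start, none)), the `start`/`start_index`
-- state and the tn/fp counters.  Indexing y_true[i]/y_pred[i]/y_true[i+1] is ported as
-- List.getD: exact because under Pre_ every index used is in range of both lists.
def pvALoop1 (yt yp : List String) (n : Nat) :
    List Nat → List (Nat × Option Nat) → Bool → Nat → Int → Int →
    List (Nat × Option Nat) × Int × Int
  | [], pairs, _start, _si, tn, fp => (pairs, tn, fp)
  | i :: rest, pairs, start, si, tn, fp =>
    let t := yt.getD i ""
    let tn' := if t == "O" then (if yp.getD i "" == "O" then tn + 1 else tn) else tn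
    let fp' := if t == "O" then (if yp.getD i "" == "O" then fp else fp + 1) else fp
    -- `if start:` close the pending span at a new "B"
    let pairs1 := if t == "B" && start then pairs ++ [(si, some i)] else pairs
    let start1 := if t == "B" && start then false else start
    -- the two `continue` branches appending a singleton (start_index = i)
    if t == "B" && (if i < n - 1 then yt.getD (i+1) "" == "B" else true) then
      pvALoop1 yt yp n rest (pairs1 ++ [(i, none)]) start1 i tn' fp'
    else if t == "B" && !start1 then
      pvALoop1 yt yp n rest pairs1 true i tn' fp'
    else if start1 && (t == "O" || i == n - 1) then
      pvALoop1 yt yp n rest (pairs1 ++ [(si, some (if i == n - 1 then i + 1 else i))]) false si tn' fp'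
    else
      pvALoop1 yt yp n rest pairs1 start1 si tn' fp'

-- Loop 2 of A over `pairs`: tp/fn.  y[a:b] is ported as (y.drop a).take (b-a), exact for
-- the nonnegative bounds A produces.
def pvALoop2 (yt yp : List String) : List (Nat × Option Nat) → Int → Int → Int × Int
  | [], tp, fn => (tp, fn)
  | (p, none) :: rest, tp, fn =>
    if yt.getD p "" == yp.getD p "" then pvALoop2 yt yp rest (tp + 1) fn
    else pvALoop2 yt yp rest tp (fn + 1)
  | (a, some b) :: rest, tp, fn =>
    if (yt.drop a).take (b - a) == (yp.drop a).take (b - a) then pvALoop2 yt yp rest (tp + 1) fn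
    else pvALoop2 yt yp rest tp (fn + 1)

def estimate_exact_fscore (y_true : List String) (y_pred : List String) : Int × Int × Int × Int :=
  let n := y_true.length
  let r := pvALoop1 y_true y_pred n (List.range n) [] false 0 0 0
  let s := pvALoop2 y_true y_pred r.1 0 0
  (s.1, r.2.1, r.2.2, s.2)

-- ===== PORT B =====
-- B's single pass: `open_` is Python's open_start (None ↦ none); counters in order tp tn fp fn.
def pvBLoop (yt yp : List String) (n : Nat) :
    List Nat → Option Nat → Int → Int → Int → Int → Int × Int × Int × Int
  | [], _open, tp, tn, fp, fn => (tp, tn, fp, fn)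
  | i :: rest, open_, tp, tn, fp, fn =>
    let t := yt.getD i ""
    let tn' := if t == "O" then (if yp.getD i "" == "O" then tn + 1 else tn) else tn
    let fp' := if t == "O" then (if yp.getD i "" == "O" then fp else fp + 1) else fp
    if t == "B" then
      -- close any open span at this "B"
      let c : Int × Int :=
        match open_ with
        | some s =>
          if (yt.drop s).take (i - s) == (yp.drop s).take (i - s) then (tp + 1, fn) else (tp, fn + 1)
        | none => (tp, fn)
      if (i + 1 < n && yt.getD (i+1) "" == "B") || i == n - 1 then
        -- isolated "B": judged by this single position
        if yp.getD i "" == "B" then pvBLoop yt yp n rest none (c.1 + 1) tn' fp' c.2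
        else pvBLoop yt yp n rest none c.1 tn' fp' (c.2 + 1)
      else
        pvBLoop yt yp n rest (some i) c.1 tn' fp' c.2
    else
      match open_ with
      | some s =>
        if t == "O" || i == n - 1 then
          let e := if i == n - 1 then i + 1 else i
          if (yt.drop s).take (e - s) == (yp.drop s).take (e - s) then
            pvBLoop yt yp n rest none (tp + 1) tn' fp' fn
          else
            pvBLoop yt yp n rest none tp tn' fp' (fn + 1)
        else pvBLoop yt yp n rest open_ tp tn' fp' fn
      | none => pvBLoop yt yp n rest none tp tn' fp' fn

def estimate_exact_fscore_alt (y_true : List String) (y_pred : List String) : Int × Int × Int × Int :=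
  let n := y_true.length
  pvBLoop y_true y_pred n (List.range n) none 0 0 0 0

-- ===== PRECONDITION & SPEC =====
-- Pre_ is exactly the condition under which the Python A returns normally: every position
-- at which A consults y_pred -- an "O" position, or an isolated "B" (last index, or followed
-- by another "B") -- must lie within y_pred; otherwise A raises IndexError.
def Pre_estimate_exact_fscore (y_true : List String) (y_pred : List String) : Prop :=
  ∀ i < y_true.length,
    (y_true.getD i "" = "O" ∨
      (y_true.getD i "" = "B" ∧ (i = y_true.length - 1 ∨ y_true.getD (i + 1) "" = "B"))) →
    i < y_pred.length
instance (y_true : List String) (y_pred : List String) : Decidable (Pre_estimate_exact_fscore y_true y_pred) := by unfold Pre_estimate_exact_fscore; infer_instance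

def pvWitness_estimate_exact_fscore : List String × List String := (["B", "O"], ["B", "O"])

def Spec_estimate_exact_fscore (y_true : List String) (y_pred : List String) (out : Int × Int × Int × Int) : Prop := out = estimate_exact_fscore_alt y_true y_pred
instance (y_true : List String) (y_pred : List String) (out : Int × Int × Int × Int) : Decidable (Spec_estimate_exact_fscore y_true y_pred out) := by unfold Spec_estimate_exact_fscore; infer_instance

-- ===== CLAIM (what is proved, stated in full; the proofs are below) =====
def Claim_equal_estimate_exact_fscore : Prop := ∀ (y_true : List String) (y_pred : List String), Dom_estimate_exact_fscore y_true y_pred → Pre_estimate_exact_fscore y_true y_pred → Spec_estimate_exact_fscore y_true y_pred (estimate_exact_fscore y_true y_pred)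

-- ===== LEMMAS AND PROOFS =====

-- pvALoop1 only ever appends to its pairs accumulator.
theorem pvALoop1_pairs_append (yt yp : List String) (n : Nat) (idxs : List Nat)
    (pairs : List (Nat × Option Nat)) (start : Bool) (si : Nat) (tn fp : Int) :
    pvALoop1 yt yp n idxs pairs start si tn fp =
      ((pairs ++ (pvALoop1 yt yp n idxs [] start si tn fp).1),
       (pvALoop1 yt yp n idxs [] start si tn fp).2) := by
  induction idxs generalizing pairs start si tn fp with
  | nil => simp [pvALoop1]
  | cons i rest ih =>
    simp only [pvALoop1]
    split_ifs <;>
      (conv_lhs => rw [ih]) <;>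
      (conv_rhs => rw [ih]) <;>
      simp [List.append_assoc]

-- pvALoop2 over an appended list runs the two halves in sequence.
theorem pvALoop2_append (yt yp : List String) (xs ys : List (Nat × Option Nat)) (tp fn : Int) :
    pvALoop2 yt yp (xs ++ ys) tp fn =
      pvALoop2 yt yp ys (pvALoop2 yt yp xs tp fn).1 (pvALoop2 yt yp xs tp fn).2 := by
  induction xs generalizing tp fn with
  | nil => simp [pvALoop2]
  | cons p rest ih =>
    obtain ⟨a, b⟩ := p
    cases b <;> simp only [pvALoop2, List.cons_append] <;> split_ifs <;> exact ih _ _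

-- Main invariant: running A's remaining loop-1 (with an empty pairs accumulator) and then
-- classifying the produced pairs, continuing from already-accumulated tp/fn, equals running
-- B's single loop from the corresponding state (open_start = some si iff start).
theorem pvMain (yt yp : List String) (n : Nat) (idxs : List Nat)
    (hidx : ∀ i ∈ idxs, i < n)
    (start : Bool) (si : Nat) (tp tn fp fn : Int) :
    ((pvALoop2 yt yp (pvALoop1 yt yp n idxs [] start si tn fp).1 tp fn).1,
     (pvALoop1 yt yp n idxs [] start si tn fp).2.1,
     (pvALoop1 yt yp n idxs [] start si tn fp).2.2,
     (pvALoop2 yt yp (pvALoop1 yt yp n idxs [] start si tn fp).1 tp fn).2) =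
    pvBLoop yt yp n idxs (if start then some si else none) tp tn fp fn := by
  induction idxs generalizing start si tp tn fp fn with
  | nil => cases start <;> simp [pvALoop1, pvALoop2, pvBLoop]
  | cons i rest ih =>
    have hi : i < n := hidx i (by simp)
    have hrest : ∀ j ∈ rest, j < n := fun j hj => hidx j (List.mem_cons_of_mem _ hj)
    have ihNone : ∀ (s : Nat) (tp tn fp fn : Int),
        ((pvALoop2 yt yp (pvALoop1 yt yp n rest [] false s tn fp).1 tp fn).1,
         (pvALoop1 yt yp n rest [] false s tn fp).2.1,
         (pvALoop1 yt yp n rest [] false s tn fp).2.2,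
         (pvALoop2 yt yp (pvALoop1 yt yp n rest [] false s tn fp).1 tp fn).2) =
        pvBLoop yt yp n rest none tp tn fp fn :=
      fun s tp tn fp fn => by simpa using ih hrest false s tp tn fp fn
    have ihSome : ∀ (s : Nat) (tp tn fp fn : Int),
        ((pvALoop2 yt yp (pvALoop1 yt yp n rest [] true s tn fp).1 tp fn).1,
         (pvALoop1 yt yp n rest [] true s tn fp).2.1,
         (pvALoop1 yt yp n rest [] true s tn fp).2.2,
         (pvALoop2 yt yp (pvALoop1 yt yp n rest [] true s tn fp).1 tp fn).2) =
        pvBLoop yt yp n rest (some s) tp tn fp fn :=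
      fun s tp tn fp fn => by simpa using ih hrest true s tp tn fp fn
    clear ih
    have eBB : (("B" : String) == "B") = true := by decide
    have eBO : (("B" : String) == "O") = false := by decide
    simp only [pvALoop1, pvBLoop, List.getD_eq_getElem?_getD, List.nil_append]
    by_cases hB : yt[i]?.getD "" = "B"
    · rw [hB]
      cases start with
      | true =>
        simp only [eBB, eBO, Bool.true_and, Bool.and_true, Bool.false_eq_true, if_false,
          if_true, Bool.not_false]
        by_cases hend : i = n - 1
        · -- last index: close the pending span, then a singleton, in both
          have h1 : ¬ i < n - 1 := by omega
          have h4 : (i == n - 1) = true := by simp [hend]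
          simp only [if_neg h1, h4, Bool.or_true, eq_self_iff_true, if_true]
          rw [pvALoop1_pairs_append yt yp n rest ([(si, some i)] ++ [(i, none)]), pvALoop2_append]
          simp only [List.cons_append, List.nil_append, pvALoop2,
            List.getD_eq_getElem?_getD, hB]
          by_cases hq : yp[i]?.getD "" = "B"
          · have hq1 : (("B" : String) == yp[i]?.getD "") = true := by rw [hq]; exact eBB
            have hq2 : (yp[i]?.getD "" == "B") = true := beq_iff_eq.mpr hq
            cases hsl : (List.take (i - si) (List.drop si yt) == List.take (i - si) (List.drop si yp)) <;>
              simp only [hsl, hq1, hq2, Bool.false_eq_true, if_false, eq_self_iff_true, if_true] <;>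
              exact ihNone i _ _ _ _
          · have hq1 : (("B" : String) == yp[i]?.getD "") = false :=
              beq_eq_false_iff_ne.mpr (fun h => hq h.symm)
            have hq2 : (yp[i]?.getD "" == "B") = false := beq_eq_false_iff_ne.mpr hq
            cases hsl : (List.take (i - si) (List.drop si yt) == List.take (i - si) (List.drop si yp)) <;>
              simp only [hsl, hq1, hq2, Bool.false_eq_true, if_false, eq_self_iff_true, if_true] <;>
              exact ihNone i _ _ _ _
        · have h1 : i < n - 1 := by omega
          have h2 : i + 1 < n := by omega
          have h3 : (i == n - 1) = false := by simp [hend]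
          simp only [if_pos h1, h2, decide_true, Bool.true_and, h3, Bool.or_false]
          cases hu : (yt[i + 1]?.getD "" == "B") with
          | true =>
            -- next is "B": close the pending span, then a singleton, in both
            simp only [hu, eq_self_iff_true, if_true]
            rw [pvALoop1_pairs_append yt yp n rest ([(si, some i)] ++ [(i, none)]), pvALoop2_append]
            simp only [List.cons_append, List.nil_append, pvALoop2,
              List.getD_eq_getElem?_getD, hB]
            by_cases hq : yp[i]?.getD "" = "B"
            · have hq1 : (("B" : String) == yp[i]?.getD "") = true := by rw [hq]; exact eBB
              have hq2 : (yp[i]?.getD "" == "B") = true := beq_iff_eq.mpr hq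
              cases hsl : (List.take (i - si) (List.drop si yt) == List.take (i - si) (List.drop si yp)) <;>
                simp only [hsl, hq1, hq2, Bool.false_eq_true, if_false, eq_self_iff_true, if_true] <;>
                exact ihNone i _ _ _ _
            · have hq1 : (("B" : String) == yp[i]?.getD "") = false :=
                beq_eq_false_iff_ne.mpr (fun h => hq h.symm)
              have hq2 : (yp[i]?.getD "" == "B") = false := beq_eq_false_iff_ne.mpr hq
              cases hsl : (List.take (i - si) (List.drop si yt) == List.take (i - si) (List.drop si yp)) <;>
                simp only [hsl, hq1, hq2, Bool.false_eq_true, if_false, eq_self_iff_true, if_true] <;>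
                exact ihNone i _ _ _ _
          | false =>
            -- next not "B": close the pending span, open a new one at i, in both
            simp only [hu, Bool.false_eq_true, if_false]
            rw [pvALoop1_pairs_append yt yp n rest [(si, some i)], pvALoop2_append]
            simp only [pvALoop2, List.getD_eq_getElem?_getD]
            cases hsl : (List.take (i - si) (List.drop si yt) == List.take (i - si) (List.drop si yp)) <;>
              simp only [hsl, Bool.false_eq_true, if_false, eq_self_iff_true, if_true] <;>
              exact ihSome i _ _ _ _
      | false =>
        simp only [eBB, eBO, Bool.true_and, Bool.and_false, Bool.false_eq_true, if_false,
          if_true, Bool.not_false, Bool.and_true]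
        by_cases hend : i = n - 1
        · have h1 : ¬ i < n - 1 := by omega
          have h4 : (i == n - 1) = true := by simp [hend]
          simp only [if_neg h1, h4, Bool.or_true, eq_self_iff_true, if_true]
          rw [pvALoop1_pairs_append yt yp n rest ([] ++ [(i, none)]), pvALoop2_append]
          simp only [List.cons_append, List.nil_append, pvALoop2,
            List.getD_eq_getElem?_getD, hB]
          by_cases hq : yp[i]?.getD "" = "B"
          · have hq1 : (("B" : String) == yp[i]?.getD "") = true := by rw [hq]; exact eBB
            have hq2 : (yp[i]?.getD "" == "B") = true := beq_iff_eq.mpr hq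
            simp only [hq1, hq2, eq_self_iff_true, if_true]
            exact ihNone i _ _ _ _
          · have hq1 : (("B" : String) == yp[i]?.getD "") = false :=
              beq_eq_false_iff_ne.mpr (fun h => hq h.symm)
            have hq2 : (yp[i]?.getD "" == "B") = false := beq_eq_false_iff_ne.mpr hq
            simp only [hq1, hq2, Bool.false_eq_true, if_false]
            exact ihNone i _ _ _ _
        · have h1 : i < n - 1 := by omega
          have h2 : i + 1 < n := by omega
          have h3 : (i == n - 1) = false := by simp [hend]
          simp only [if_pos h1, h2, decide_true, Bool.true_and, h3, Bool.or_false]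
          cases hu : (yt[i + 1]?.getD "" == "B") with
          | true =>
            simp only [hu, eq_self_iff_true, if_true]
            rw [pvALoop1_pairs_append yt yp n rest ([] ++ [(i, none)]), pvALoop2_append]
            simp only [List.cons_append, List.nil_append, pvALoop2,
              List.getD_eq_getElem?_getD, hB]
            by_cases hq : yp[i]?.getD "" = "B"
            · have hq1 : (("B" : String) == yp[i]?.getD "") = true := by rw [hq]; exact eBB
              have hq2 : (yp[i]?.getD "" == "B") = true := beq_iff_eq.mpr hq
              simp only [hq1, hq2, eq_self_iff_true, if_true]
              exact ihNone i _ _ _ _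
            · have hq1 : (("B" : String) == yp[i]?.getD "") = false :=
                beq_eq_false_iff_ne.mpr (fun h => hq h.symm)
              have hq2 : (yp[i]?.getD "" == "B") = false := beq_eq_false_iff_ne.mpr hq
              simp only [hq1, hq2, Bool.false_eq_true, if_false]
              exact ihNone i _ _ _ _
          | false =>
            -- next not "B": open a new span at i, in both
            simp only [hu, Bool.false_eq_true, if_false]
            exact ihSome i _ _ _ _
    · -- t ≠ "B"
      have hBb : (yt[i]?.getD "" == "B") = false := by simp [hB]
      simp only [hBb, Bool.false_and, Bool.false_eq_true, if_false]
      cases start with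
      | true =>
        simp only [Bool.and_false, Bool.true_and, Bool.not_false, if_false, Bool.false_eq_true]
        cases hc : (yt[i]?.getD "" == "O" || i == n - 1) with
        | true =>
          -- close the pending span at "O" / end of sequence, in both
          simp only [hc, eq_self_iff_true, if_true]
          rw [pvALoop1_pairs_append yt yp n rest
              ([] ++ [(si, some (if i == n - 1 then i + 1 else i))]), pvALoop2_append]
          simp only [List.cons_append, List.nil_append, pvALoop2, List.getD_eq_getElem?_getD]
          cases hsl : (List.take ((if i == n - 1 then i + 1 else i) - si) (List.drop si yt)
              == List.take ((if i == n - 1 then i + 1 else i) - si) (List.drop si yp)) <;>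
            simp only [hsl, Bool.false_eq_true, if_false, eq_self_iff_true, if_true] <;>
            exact ihNone si _ _ _ _
        | false =>
          simp only [hc, Bool.false_eq_true, if_false]
          exact ihSome si _ _ _ _
      | false =>
        simp only [Bool.and_false, Bool.false_and, Bool.false_eq_true, if_false]
        exact ihNone si _ _ _ _

-- ===== VERDICT (by name: the statement is the Claim_ definition above) =====
theorem estimate_exact_fscore_spec : Claim_equal_estimate_exact_fscore := by
  intro yt yp _hdom _hpre
  unfold Spec_estimate_exact_fscore estimate_exact_fscore estimate_exact_fscore_alt
  exact pvMain yt yp yt.length (List.range yt.length)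
    (fun i hi => List.mem_range.mp hi) false 0 0 0 0 0
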